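-- pv_equiv track=rewrite | github.com/tastyna2/dirpack | test/modify_dos.py | calc_rawaddr
-- ===== SOURCE A (Python) =====
-- def calc_rawaddr(vaddr, sec_list, new):
--     is_fileoffset = True
--     for si in sec_list:
--         if vaddr >= si['secva'] and vaddr < si['secva'] + si['secsz']:
--             if new:
--                 return vaddr - si['secva'] + si['newra']
--             else:
--                 return vaddr - si['secva'] + si['secra']
--         if vaddr >= si['secva']:
--             is_fileoffset = False
--     if is_fileoffset:
--         return vaddr
-- ===== SOURCE B (Python) =====
-- def calc_rawaddr(vaddr, sec_list, new):
--     key = 'newra' if new else 'secra'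
--     hits = [vaddr - si['secva'] + si[key]
--             for si in sec_list
--             if si['secva'] <= vaddr < si['secva'] + si['secsz']]
--     if hits:
--         return hits[0]
--     if not sec_list or vaddr < min(si['secva'] for si in sec_list):
--         return vaddr
-- ===== Notes on version B (the rewrite author's own statement) =====
-- stated objective: alternative
-- what changed: B has no scanning search loop at all: it materializes the list of all containing-section translations with one comprehension and returns its first element, and otherwise compares vaddr against min() of all secva values (empty list guarded), instead of A's early-return scan threading an is_fileoffset flag.
-- outside the precondition, e.g. on calc_rawaddr(0, [{'secva': 0, 'secsz': 5, 'secra': 1}, {}], False): A returns 1, B raises KeyError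
import Mathlib
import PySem

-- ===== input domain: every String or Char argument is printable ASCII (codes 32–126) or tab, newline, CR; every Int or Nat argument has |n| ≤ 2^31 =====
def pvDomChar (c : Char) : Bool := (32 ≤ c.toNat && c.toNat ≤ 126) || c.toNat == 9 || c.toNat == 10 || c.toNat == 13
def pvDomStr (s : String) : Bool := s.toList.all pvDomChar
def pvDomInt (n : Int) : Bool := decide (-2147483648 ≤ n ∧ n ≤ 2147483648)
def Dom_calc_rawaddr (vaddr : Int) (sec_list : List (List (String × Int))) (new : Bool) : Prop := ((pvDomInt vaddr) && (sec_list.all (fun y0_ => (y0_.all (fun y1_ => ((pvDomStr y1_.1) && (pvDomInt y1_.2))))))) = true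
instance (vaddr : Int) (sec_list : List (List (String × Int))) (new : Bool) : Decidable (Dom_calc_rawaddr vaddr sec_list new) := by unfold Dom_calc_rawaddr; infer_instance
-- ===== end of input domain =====

-- B: one comprehension collecting every containing-section translation (first element taken),
-- plus a min()-comparison for the below-all-sections case; proved equal to A on Pre_.
-- ===== PORT A =====
-- A's for-loop, threading the is_fileoffset flag; dict lookups via PySem.Dict.get? (a missing key
-- makes Python raise KeyError — excluded by Pre_; the port returns none there); the `and` in A's
-- condition short-circuits, so 'secsz' is only looked up when vaddr ≥ secva, as in Python.
def pvALoop (vaddr : Int) (new : Bool) (flag : Bool) : List (List (String × Int)) → Option Int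
  | [] => if flag then some vaddr else none
  | si :: rest =>
    match PySem.Dict.get? (PySem.Dict.ofList si) "secva" with
    | none => none
    | some va =>
      if vaddr ≥ va then
        match PySem.Dict.get? (PySem.Dict.ofList si) "secsz" with
        | none => none
        | some sz =>
          if vaddr < va + sz then
            if new then (PySem.Dict.get? (PySem.Dict.ofList si) "newra").map (fun ra => vaddr - va + ra)
            else (PySem.Dict.get? (PySem.Dict.ofList si) "secra").map (fun ra => vaddr - va + ra)
          else pvALoop vaddr new false rest
      else pvALoop vaddr new flag rest

def calc_rawaddr (vaddr : Int) (sec_list : List (List (String × Int))) (new : Bool) : Option Int :=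
  pvALoop vaddr new true sec_list

-- ===== PORT B =====
-- the comprehension: every translation vaddr-secva+si[key] of a section containing vaddr, in order
-- (chained comparison short-circuits: 'secsz' only looked up when secva ≤ vaddr; KeyError ⇒ none)
def pvHits (vaddr : Int) (key : String) : List (List (String × Int)) → Option (List Int)
  | [] => some []
  | si :: rest =>
    match PySem.Dict.get? (PySem.Dict.ofList si) "secva" with
    | none => none
    | some va =>
      if va ≤ vaddr then
        match PySem.Dict.get? (PySem.Dict.ofList si) "secsz" with
        | none => none
        | some sz =>
          if vaddr < va + sz then
            match PySem.Dict.get? (PySem.Dict.ofList si) key with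
            | none => none
            | some ra => (pvHits vaddr key rest).map (fun hs => (vaddr - va + ra) :: hs)
          else pvHits vaddr key rest
      else pvHits vaddr key rest

-- the generator feeding min(): all secva values (KeyError ⇒ none)
def pvSecvas : List (List (String × Int)) → Option (List Int)
  | [] => some []
  | si :: rest =>
    match PySem.Dict.get? (PySem.Dict.ofList si) "secva" with
    | none => none
    | some va => (pvSecvas rest).map (fun vs => va :: vs)

def calc_rawaddr_alt (vaddr : Int) (sec_list : List (List (String × Int))) (new : Bool) : Option Int :=
  let key := if new then "newra" else "secra"
  match pvHits vaddr key sec_list with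
  | none => none
  | some (h :: _) => some h
  | some [] =>
    if sec_list.isEmpty then some vaddr
    else
      match pvSecvas sec_list with
      | none => none
      | some vas =>
        match PySem.List.min? vas (fun x => x) with
        | none => none  -- unreachable: sec_list nonempty ⇒ vas nonempty
        | some m => if vaddr < m then some vaddr else none

-- ===== PRECONDITION & SPEC =====
-- Pre_ requires each section dict to carry 'secva', 'secsz' when vaddr has reached it, and the ra key
-- selected by `new` when it contains vaddr. It slightly over-approximates the KeyError region: the
-- requirement is quantified over ALL sections, while A stops scanning at the first containing
-- section, so A can still return on inputs where a LATER section is malformed — those are excluded too.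
def Pre_calc_rawaddr (vaddr : Int) (sec_list : List (List (String × Int))) (new : Bool) : Prop :=
  ∀ si ∈ sec_list,
    (PySem.Dict.get? (PySem.Dict.ofList si) "secva").isSome ∧
    ((PySem.Dict.get? (PySem.Dict.ofList si) "secva").getD 0 ≤ vaddr →
      (PySem.Dict.get? (PySem.Dict.ofList si) "secsz").isSome ∧
      (vaddr < (PySem.Dict.get? (PySem.Dict.ofList si) "secva").getD 0 +
               (PySem.Dict.get? (PySem.Dict.ofList si) "secsz").getD 0 →
        (PySem.Dict.get? (PySem.Dict.ofList si) (if new then "newra" else "secra")).isSome))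
instance (vaddr : Int) (sec_list : List (List (String × Int))) (new : Bool) : Decidable (Pre_calc_rawaddr vaddr sec_list new) := by unfold Pre_calc_rawaddr; infer_instance

def pvWitness_calc_rawaddr : Int × (List (List (String × Int))) × Bool :=
  (5, [[("secva", 0), ("secsz", 10), ("secra", 100), ("newra", 200)]], true)

def Spec_calc_rawaddr (vaddr : Int) (sec_list : List (List (String × Int))) (new : Bool) (out : Option Int) : Prop := out = calc_rawaddr_alt vaddr sec_list new
instance (vaddr : Int) (sec_list : List (List (String × Int))) (new : Bool) (out : Option Int) : Decidable (Spec_calc_rawaddr vaddr sec_list new out) := by unfold Spec_calc_rawaddr; infer_instance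

-- ===== CLAIM =====
def Claim_equal_calc_rawaddr : Prop := ∀ (vaddr : Int) (sec_list : List (List (String × Int))) (new : Bool), Dom_calc_rawaddr vaddr sec_list new → Pre_calc_rawaddr vaddr sec_list new → Spec_calc_rawaddr vaddr sec_list new (calc_rawaddr vaddr sec_list new)

-- ===== LEMMAS AND PROOFS =====
-- Proof-side helpers: A's loop is first characterised as a first-match search plus an all-below scan.
def pvFindSec (vaddr : Int) (key : String) : List (List (String × Int)) → Option Int
  | [] => none
  | si :: rest =>
    match PySem.Dict.get? (PySem.Dict.ofList si) "secva" with
    | none => none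
    | some va =>
      if va ≤ vaddr then
        match PySem.Dict.get? (PySem.Dict.ofList si) "secsz" with
        | none => none
        | some sz =>
          if vaddr < va + sz then (PySem.Dict.get? (PySem.Dict.ofList si) key).map (fun ra => vaddr - va + ra)
          else pvFindSec vaddr key rest
      else pvFindSec vaddr key rest

def pvAllBelow (vaddr : Int) : List (List (String × Int)) → Bool
  | [] => true
  | si :: rest =>
    match PySem.Dict.get? (PySem.Dict.ofList si) "secva" with
    | some va => decide (vaddr < va) && pvAllBelow vaddr rest
    | none => false

theorem pvALoop_eq (vaddr : Int) (new : Bool) (l : List (List (String × Int)))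
    (h : Pre_calc_rawaddr vaddr l new) (flag : Bool) :
    pvALoop vaddr new flag l =
      match pvFindSec vaddr (if new then "newra" else "secra") l with
      | some v => some v
      | none => if flag && pvAllBelow vaddr l then some vaddr else none := by
  induction l generalizing flag with
  | nil => simp [pvALoop, pvFindSec, pvAllBelow]
  | cons si rest ih =>
    obtain ⟨hva, hcond⟩ := h si (List.mem_cons_self ..)
    obtain ⟨va, hva'⟩ := Option.isSome_iff_exists.mp hva
    have hrest : Pre_calc_rawaddr vaddr rest new := fun x hx => h x (List.mem_cons_of_mem _ hx)
    by_cases hge : vaddr ≥ va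
    · obtain ⟨hsz, hkey⟩ := hcond (by rw [hva']; exact hge)
      obtain ⟨sz, hsz'⟩ := Option.isSome_iff_exists.mp hsz
      by_cases hlt : vaddr < va + sz
      · have hk := hkey (by rw [hva', hsz']; exact hlt)
        obtain ⟨ra, hk'⟩ := Option.isSome_iff_exists.mp hk
        cases new <;> simp only [Bool.false_eq_true, if_false, if_true] at hk' <;>
          simp [pvALoop, pvFindSec, hva', hsz', hge, hlt, hk']
      · have hnb : ¬ vaddr < va := by omega
        simp only [pvALoop, pvFindSec, pvAllBelow, hva', hsz', if_pos hge, if_neg hlt]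
        rw [ih hrest]
        cases pvFindSec vaddr (if new then "newra" else "secra") rest with
        | some v => simp
        | none => simp [hnb]
    · have hle : ¬ va ≤ vaddr := hge
      simp only [pvALoop, pvFindSec, pvAllBelow, hva', if_neg hge]
      rw [ih hrest]
      cases pvFindSec vaddr (if new then "newra" else "secra") rest with
      | some v => simp
      | none =>
        have : vaddr < va := by omega
        simp [this]

-- Under Pre_, the comprehension succeeds and the search returns its first element.
theorem pvHits_head (vaddr : Int) (new : Bool) (l : List (List (String × Int)))
    (h : Pre_calc_rawaddr vaddr l new) :
    ∃ hs, pvHits vaddr (if new then "newra" else "secra") l = some hs ∧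
          pvFindSec vaddr (if new then "newra" else "secra") l = hs.head? := by
  induction l with
  | nil => exact ⟨[], rfl, rfl⟩
  | cons si rest ih =>
    obtain ⟨hva, hcond⟩ := h si (List.mem_cons_self ..)
    obtain ⟨va, hva'⟩ := Option.isSome_iff_exists.mp hva
    obtain ⟨hs, hhs, hfs⟩ := ih (fun x hx => h x (List.mem_cons_of_mem _ hx))
    by_cases hge : va ≤ vaddr
    · obtain ⟨hsz, hkey⟩ := hcond (by rw [hva']; exact hge)
      obtain ⟨sz, hsz'⟩ := Option.isSome_iff_exists.mp hsz
      by_cases hlt : vaddr < va + sz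
      · have hk := hkey (by rw [hva', hsz']; exact hlt)
        obtain ⟨ra, hk'⟩ := Option.isSome_iff_exists.mp hk
        refine ⟨(vaddr - va + ra) :: hs, ?_, ?_⟩ <;>
          simp [pvHits, pvFindSec, hva', hsz', hge, hlt, hk', hhs]
      · refine ⟨hs, ?_, ?_⟩ <;> simp [pvHits, pvFindSec, hva', hsz', hge, hlt, hhs, hfs]
    · refine ⟨hs, ?_, ?_⟩ <;> simp [pvHits, pvFindSec, hva', hge, hhs, hfs]

-- Under Pre_, the secva generator succeeds, mirrors the list's shape, and the min()-comparison
-- agrees with the all-below scan.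
theorem pvSecvas_below (vaddr : Int) (l : List (List (String × Int)))
    (h : ∀ si ∈ l, (PySem.Dict.get? (PySem.Dict.ofList si) "secva").isSome) :
    ∃ vas, pvSecvas l = some vas ∧ (vas = [] ↔ l = []) ∧
           (pvAllBelow vaddr l = vas.all (fun va => decide (vaddr < va))) := by
  induction l with
  | nil => exact ⟨[], rfl, by simp, rfl⟩
  | cons si rest ih =>
    obtain ⟨va, hva'⟩ := Option.isSome_iff_exists.mp (h si (List.mem_cons_self ..))
    obtain ⟨vas, hv, _, hb⟩ := ih (fun x hx => h x (List.mem_cons_of_mem _ hx))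
    exact ⟨va :: vas, by simp [pvSecvas, hva', hv], by simp,
           by simp [pvAllBelow, hva', hb]⟩

theorem min_all_below (vaddr : Int) (vas : List Int) (hne : vas ≠ []) :
    (match PySem.List.min? vas (fun x => x) with
      | none => (none : Option Int)
      | some m => if vaddr < m then some vaddr else none)
      = (if vas.all (fun va => decide (vaddr < va)) then some vaddr else none) := by
  cases hm : PySem.List.min? vas (fun x => x) with
  | none => exact absurd ((PySem.List.min?_eq_none_iff vas (fun x => x)).mp hm) hne
  | some m =>
    have hmem := PySem.List.min?_mem hm
    have hmin := PySem.List.min?_isMin hm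
    by_cases hlt : vaddr < m
    · have : vas.all (fun va => decide (vaddr < va)) = true := by
        simp only [List.all_eq_true]
        intro va hva
        have := hmin va hva
        simp only [decide_eq_true_eq]
        omega
      simp [hlt, this]
    · have : ¬ vas.all (fun va => decide (vaddr < va)) = true := by
        simp only [List.all_eq_true]
        intro hall
        exact hlt (by simpa using hall m hmem)
      simp [hlt, this]

-- ===== VERDICT =====
theorem calc_rawaddr_spec : Claim_equal_calc_rawaddr := by
  intro vaddr sec_list new _ hpre
  unfold Spec_calc_rawaddr calc_rawaddr calc_rawaddr_alt
  rw [pvALoop_eq vaddr new sec_list hpre true]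
  obtain ⟨hs, hhs, hfs⟩ := pvHits_head vaddr new sec_list hpre
  obtain ⟨vas, hv, hemp, hb⟩ := pvSecvas_below vaddr sec_list (fun si hsi => (hpre si hsi).1)
  simp only [hhs, hfs, hv]
  cases hs with
  | cons h t => simp
  | nil =>
    simp only [List.head?]
    by_cases he : sec_list = []
    · simp [he, pvAllBelow]
    · have hne : vas ≠ [] := fun h0 => he (hemp.mp h0)
      have hie : sec_list.isEmpty = false := by simpa using he
      simp only [hie, Bool.false_eq_true, if_false]
      rw [min_all_below vaddr vas hne, ← hb]
      simp
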